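-- pv_equiv track=rewrite | github.com/rbyrne30/Fun_Programs | largestSquare/largestSquare.py | getMaxConsecutive
-- ===== SOURCE A (Python) =====
-- def getMaxConsecutive(L):
--     max = 0;
--     count = 0;
--     countIndex = 0;
--     for i in range(len(L)):
--         if L[i] == '1':
--             count += 1
--             if count > max:
--                 countIndex = i
--                 max = count
--         else:
--             count = 0
--         max = max if max > count else count
--     return max, countIndex-max+1
-- ===== SOURCE B (Python) =====
-- def _runs(L):
--     # run-length encode L by whether each element equals '1'
--     runs = []
--     i = 0
--     n = len(L)
--     while i < n:
--         one = (L[i] == '1')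
--         j = i + 1
--         while j < n and (L[j] == '1') == one:
--             j += 1
--         runs.append((one, j - i))
--         i = j
--     return runs
--
-- def getMaxConsecutive(L):
--     best, best_end, i = 0, 0, 0
--     for one, n in _runs(L):
--         if one and n > best:
--             best, best_end = n, i + n - 1
--         i += n
--     return best, best_end - best + 1
-- ===== Notes on version B (the rewrite author's own statement) =====
-- stated objective: alternative
-- what changed: B first run-length encodes L into maximal runs (flag, length) and then folds once over the runs, updating the best run length and its end index per run, instead of A's per-element scan that maintains a running count and updates the maximum at every element.
import Mathlib
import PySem

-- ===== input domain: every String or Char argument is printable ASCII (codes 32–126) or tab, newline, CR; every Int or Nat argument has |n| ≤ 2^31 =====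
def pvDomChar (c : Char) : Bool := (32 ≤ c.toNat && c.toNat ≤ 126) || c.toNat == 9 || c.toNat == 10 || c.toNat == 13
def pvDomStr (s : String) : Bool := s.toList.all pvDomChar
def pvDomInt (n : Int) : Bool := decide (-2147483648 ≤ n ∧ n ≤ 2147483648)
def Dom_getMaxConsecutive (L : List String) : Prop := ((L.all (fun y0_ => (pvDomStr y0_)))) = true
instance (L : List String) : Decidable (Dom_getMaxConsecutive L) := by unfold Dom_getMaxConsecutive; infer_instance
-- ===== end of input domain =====

-- B re-implements A as a run-length encoding pass followed by a fold over the runs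
-- (objective: alternative decomposition, same O(n) cost); return values proved equal.

-- ===== PORT A =====
def getMaxConsecutive (L : List String) : Int × Int :=
  let s :=
    (PySem.List.pyRange 0 (L.length : Int) 1).foldl
      (fun (s : Int × Int × Int) (i : Int) =>
        let mx := s.1
        let count := s.2.1
        let countIndex := s.2.2
        let s' :=
          if PySem.List.pyGetD L i "" == "1" then
            let count := count + 1
            if count > mx then (count, count, i) else (mx, count, countIndex)
          else
            (mx, (0 : Int), countIndex)
        ((if s'.1 > s'.2.1 then s'.1 else s'.2.1), s'.2.1, s'.2.2))
      ((0 : Int), (0 : Int), (0 : Int))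
  (s.1, s.2.2 - s.1 + 1)

-- ===== PORT B =====
-- B-side helper: run-length encode L by whether each element equals "1" (Source B's _runs)
def pvRuns (L : List String) : List (Bool × Int) :=
  match L with
  | [] => []
  | x :: xs =>
    let one := x == "1"
    let t := xs.takeWhile (fun y => (y == "1") == one)
    let r := xs.dropWhile (fun y => (y == "1") == one)
    (one, (t.length + 1 : Int)) :: pvRuns r
termination_by L.length
decreasing_by
  simp only [List.length_cons]
  exact Nat.lt_succ_of_le (List.length_dropWhile_le _ _)

def getMaxConsecutive_alt (L : List String) : Int × Int :=
  let s :=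
    (pvRuns L).foldl
      (fun (s : Int × Int × Int) (r : Bool × Int) =>
        if r.1 && decide (r.2 > s.1) then (r.2, s.2.2 + r.2 - 1, s.2.2 + r.2)
        else (s.1, s.2.1, s.2.2 + r.2))
      ((0 : Int), (0 : Int), (0 : Int))
  (s.1, s.2.1 - s.1 + 1)

-- ===== PRECONDITION & SPEC =====
def Spec_getMaxConsecutive (L : List String) (out : Int × Int) : Prop := out = getMaxConsecutive_alt L
instance (L : List String) (out : Int × Int) : Decidable (Spec_getMaxConsecutive L out) := by unfold Spec_getMaxConsecutive; infer_instance

-- ===== CLAIM (what is proved, stated in full; the proofs are below) =====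
def Claim_equal_getMaxConsecutive : Prop := ∀ (L : List String), Dom_getMaxConsecutive L → Spec_getMaxConsecutive L (getMaxConsecutive L)

-- ===== LEMMAS AND PROOFS =====

-- A's loop step, on (index, element) pairs (proof-side name for the port's lambda)
def pvA (s : Int × Int × Int) (p : Int × String) : Int × Int × Int :=
  let s' :=
    if p.2 == "1" then
      if s.2.1 + 1 > s.1 then (s.2.1 + 1, s.2.1 + 1, p.1) else (s.1, s.2.1 + 1, s.2.2)
    else
      (s.1, (0 : Int), s.2.2)
  ((if s'.1 > s'.2.1 then s'.1 else s'.2.1), s'.2.1, s'.2.2)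

-- B's loop step (proof-side name for the port's lambda)
def pvB (s : Int × Int × Int) (r : Bool × Int) : Int × Int × Int :=
  if r.1 && decide (r.2 > s.1) then (r.2, s.2.2 + r.2 - 1, s.2.2 + r.2)
  else (s.1, s.2.1, s.2.2 + r.2)

lemma bridgeA (L : List String) :
    getMaxConsecutive L =
      (let s := (PySem.List.enumerate L 0).foldl pvA ((0:Int), (0:Int), (0:Int))
       (s.1, s.2.2 - s.1 + 1)) := by
  unfold getMaxConsecutive
  rw [PySem.List.enumerate_eq_map_pyRange (d := "")]
  rw [List.foldl_map]
  rfl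

lemma ones_fold (xs : List String) (h : ∀ x ∈ xs, x = "1") :
    ∀ (mx c ci b : Int), 0 ≤ c → c ≤ mx →
    (PySem.List.enumerate xs b).foldl pvA (mx, c, ci) =
      ((if c + xs.length > mx then c + (xs.length : Int) else mx), c + (xs.length : Int),
       if c + (xs.length : Int) > mx then b + xs.length - 1 else ci) := by
  induction xs with
  | nil =>
    intro mx c ci b hc hcm
    simp only [PySem.List.enumerate_nil, List.foldl_nil, List.length_nil]
    simp only [Prod.mk.injEq]
    refine ⟨?_, ?_, ?_⟩ <;> (try split_ifs) <;> omega
  | cons x xs ih =>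
    intro mx c ci b hc hcm
    have hx : x = "1" := h x (by simp)
    have hall : ∀ y ∈ xs, y = "1" := fun y hy => h y (by simp [hy])
    rw [PySem.List.enumerate_cons, List.foldl_cons]
    have hstep : pvA (mx, c, ci) (b, x) =
        (if c + 1 > mx then (c + 1, c + 1, b) else (mx, c + 1, ci)) := by
      simp only [pvA, hx]
      split_ifs <;> simp_all <;> try omega
    rw [hstep]
    by_cases hgt : c + 1 > mx
    · rw [if_pos hgt, ih hall (c+1) (c+1) b (b+1) (by omega) (by omega)]
      simp only [List.length_cons, Prod.mk.injEq]
      push_cast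
      refine ⟨?_, ?_, ?_⟩ <;> (try split_ifs) <;> omega
    · rw [if_neg hgt, ih hall mx (c+1) ci (b+1) (by omega) (by omega)]
      simp only [List.length_cons, Prod.mk.injEq]
      push_cast
      refine ⟨?_, ?_, ?_⟩ <;> (try split_ifs) <;> omega

lemma nonones_fold (xs : List String) (h : ∀ x ∈ xs, x ≠ "1") :
    ∀ (mx c ci b : Int), 0 ≤ c → c ≤ mx →
    (PySem.List.enumerate xs b).foldl pvA (mx, c, ci) =
      (mx, if xs = [] then c else 0, ci) := by
  induction xs with
  | nil => intro mx c ci b hc hcm; simp [PySem.List.enumerate_nil]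
  | cons x xs ih =>
    intro mx c ci b hc hcm
    have hx : (x == "1") = false := by
      simp only [beq_eq_false_iff_ne]; exact h x (by simp)
    have hall : ∀ y ∈ xs, y ≠ "1" := fun y hy => h y (by simp [hy])
    rw [PySem.List.enumerate_cons, List.foldl_cons]
    have hstep : pvA (mx, c, ci) (b, x) = (mx, 0, ci) := by
      simp only [pvA, hx]
      split_ifs <;> simp_all <;> try omega
    rw [hstep, ih hall mx 0 ci (b+1) (by omega) (by omega)]
    simp

lemma head?_dropWhile_false {α : Type} (p : α → Bool) (l : List α) :
    ∀ y, (l.dropWhile p).head? = some y → p y = false := by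
  induction l with
  | nil => intro y hy; simp at hy
  | cons x xs ih =>
    intro y hy
    by_cases hp : p x = true
    · rw [List.dropWhile_cons_of_pos hp] at hy; exact ih y hy
    · rw [List.dropWhile_cons_of_neg hp] at hy
      simp at hy; subst hy; simpa using hp

lemma main_fold : ∀ (n : Nat) (L : List String), L.length ≤ n →
    ∀ (mx c ci b : Int), 0 ≤ c → c ≤ mx →
    (c = 0 ∨ ∀ y, L.head? = some y → y ≠ "1") →
    (((PySem.List.enumerate L b).foldl pvA (mx, c, ci)).1,
     ((PySem.List.enumerate L b).foldl pvA (mx, c, ci)).2.2) =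
    (((pvRuns L).foldl pvB (mx, ci, b)).1,
     ((pvRuns L).foldl pvB (mx, ci, b)).2.1) := by
  intro n
  induction n with
  | zero =>
    intro L hL mx c ci b hc hcm _
    have : L = [] := List.eq_nil_of_length_eq_zero (Nat.le_zero.mp hL)
    subst this
    simp [PySem.List.enumerate_nil, pvRuns]
  | succ n ih =>
    intro L hL mx c ci b hc hcm hdisj
    cases L with
    | nil => simp [PySem.List.enumerate_nil, pvRuns]
    | cons x xs =>
      set p : String → Bool := fun y => (y == "1") == (x == "1") with hp
      have hsplit : x :: xs = (x :: xs.takeWhile p) ++ xs.dropWhile p := by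
        simp [List.takeWhile_append_dropWhile]
      have hrlen : (xs.dropWhile p).length ≤ n := by
        have := List.length_dropWhile_le p xs
        simp only [List.length_cons] at hL; omega
      have hrhead : ∀ y, (xs.dropWhile p).head? = some y → p y = false :=
        head?_dropWhile_false p xs
      have hruns : pvRuns (x :: xs) =
          ((x == "1"), ((xs.takeWhile p).length + 1 : Int)) :: pvRuns (xs.dropWhile p) := by
        rw [pvRuns]
      rw [hruns, List.foldl_cons]
      conv_lhs => rw [show (x :: xs) = (x :: xs.takeWhile p) ++ xs.dropWhile p from hsplit]
      rw [PySem.List.enumerate_append, List.foldl_append]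
      by_cases hx : (x == "1") = true
      · -- a run of ones
        have hx' : x = "1" := by simpa using hx
        have hc0 : c = 0 := by
          rcases hdisj with h0 | hh
          · exact h0
          · exact absurd hx' (hh x rfl)
        subst hc0
        have hones : ∀ y ∈ x :: xs.takeWhile p, y = "1" := by
          intro y hy
          rcases List.mem_cons.mp hy with rfl | hy'
          · exact hx'
          · have := List.mem_takeWhile_imp hy'
            rw [hp] at this; simp only [hx] at this; simpa using this
        have hrh : ∀ y, (xs.dropWhile p).head? = some y → y ≠ "1" := by
          intro y hy
          have := hrhead y hy
          rw [hp] at this; simp only [hx] at this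
          simpa using this
        rw [ones_fold _ hones mx 0 ci b le_rfl hcm]
        have hstepB : pvB (mx, ci, b) ((x == "1"), ((xs.takeWhile p).length : Int) + 1) =
            (if ((xs.takeWhile p).length : Int) + 1 > mx then
              (((xs.takeWhile p).length : Int) + 1, b + (((xs.takeWhile p).length : Int) + 1) - 1,
               b + (((xs.takeWhile p).length : Int) + 1))
             else (mx, ci, b + (((xs.takeWhile p).length : Int) + 1))) := by
          simp only [pvB, hx, Bool.true_and, decide_eq_true_eq]
        rw [hstepB]
        simp only [List.length_cons, zero_add]
        push_cast
        by_cases hkm : ((xs.takeWhile p).length : Int) + 1 > mx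
        · simp only [if_pos hkm]
          exact ih (xs.dropWhile p) hrlen (((xs.takeWhile p).length : Int) + 1)
            (((xs.takeWhile p).length : Int) + 1) (b + (((xs.takeWhile p).length : Int) + 1) - 1)
            (b + (((xs.takeWhile p).length : Int) + 1)) (by omega) (by omega) (Or.inr hrh)
        · simp only [if_neg hkm]
          exact ih (xs.dropWhile p) hrlen mx (((xs.takeWhile p).length : Int) + 1) ci
            (b + (((xs.takeWhile p).length : Int) + 1)) (by omega) (by omega) (Or.inr hrh)
      · -- a run of non-ones
        have hx' : x ≠ "1" := by simpa using hx
        have hxf : (x == "1") = false := by simpa using hx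
        have hnon : ∀ y ∈ x :: xs.takeWhile p, y ≠ "1" := by
          intro y hy
          rcases List.mem_cons.mp hy with rfl | hy'
          · exact hx'
          · have := List.mem_takeWhile_imp hy'
            rw [hp] at this; simp only [hxf] at this; simpa using this
        rw [nonones_fold _ hnon mx c ci b hc hcm]
        rw [if_neg (by simp : ¬ (x :: xs.takeWhile p) = [])]
        have hstepB : pvB (mx, ci, b) ((x == "1"), ((xs.takeWhile p).length : Int) + 1) =
            (mx, ci, b + (((xs.takeWhile p).length : Int) + 1)) := by
          simp [pvB, hxf]
        rw [hstepB]
        simp only [List.length_cons]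
        push_cast
        exact ih (xs.dropWhile p) hrlen mx 0 ci (b + (((xs.takeWhile p).length : Int) + 1))
          le_rfl (by omega) (Or.inl rfl)

-- ===== VERDICT (by name: the statement is the Claim_ definition above) =====
theorem getMaxConsecutive_spec : Claim_equal_getMaxConsecutive := by
  intro L _
  unfold Spec_getMaxConsecutive
  rw [bridgeA]
  unfold getMaxConsecutive_alt
  have h := main_fold L.length L le_rfl 0 0 0 0 le_rfl le_rfl (Or.inl rfl)
  simp only [Prod.mk.injEq] at h
  show ((((PySem.List.enumerate L 0).foldl pvA (0,0,0)).1,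
        ((PySem.List.enumerate L 0).foldl pvA (0,0,0)).2.2 -
        ((PySem.List.enumerate L 0).foldl pvA (0,0,0)).1 + 1) : Int × Int) = _
  rw [h.1, h.2]
  rfl
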